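-- pv_equiv track=rewrite | github.com/msaadsbr/AdventOfCode_24 | Day9/Part_01.py | update_disc
-- ===== SOURCE A (Python) =====
-- def update_disc(new_map):
--     i = len(new_map)-1
--     while "." in new_map[:i+1]:
--         if new_map[i]!=".":
--             doti = new_map[:i+1].index(".")
--             new_map[i], new_map[doti] = new_map[doti], new_map[i]
--         i -= 1
--     return new_map
-- ===== SOURCE B (Python) =====
-- def update_disc(new_map):
--     l, r = 0, len(new_map) - 1
--     while l < r:
--         if new_map[l] != ".":
--             l += 1
--         elif new_map[r] == ".":
--             r -= 1
--         else:
--             new_map[l], new_map[r] = new_map[r], new_map[l]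
--             l += 1
--             r -= 1
--     return new_map
-- ===== Notes on version B (the rewrite author's own statement) =====
-- stated objective: alternative
-- what changed: Replaced the right-to-left scan that rescans the prefix for '.' membership and for '.''s index on every iteration with a single two-pointer pass (left pointer over dots, right pointer over values, swapping pairs).
import Mathlib
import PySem

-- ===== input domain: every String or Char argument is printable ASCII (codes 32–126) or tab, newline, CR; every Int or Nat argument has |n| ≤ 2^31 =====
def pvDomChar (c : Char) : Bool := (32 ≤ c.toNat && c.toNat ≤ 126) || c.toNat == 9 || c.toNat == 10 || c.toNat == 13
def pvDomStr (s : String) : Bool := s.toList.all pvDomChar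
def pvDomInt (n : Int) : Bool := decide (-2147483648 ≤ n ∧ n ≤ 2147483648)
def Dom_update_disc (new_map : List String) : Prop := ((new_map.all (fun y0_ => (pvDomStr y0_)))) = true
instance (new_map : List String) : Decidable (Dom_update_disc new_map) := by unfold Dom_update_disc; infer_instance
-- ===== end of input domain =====

-- B replaces A's right-to-left scan (which rescans the prefix for "." on each
-- iteration) by a single two-pointer pass; both Pythons mutate the argument in place
-- (identically), and the equivalence proved here is about the returned value.

-- ===== PORT A =====
-- loop state: aGo n xs corresponds to Python's i = n-1; condition "." in new_map[:i+1]
def aGo : Nat → List String → List String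
  | 0, xs => xs
  | n+1, xs =>
    if "." ∈ xs.take (n+1) then
      let xs' :=
        if xs.getD n "" ≠ "." then
          let doti := (xs.take (n+1)).idxOf "."
          (xs.set doti (xs.getD n "")).set n (xs.getD doti "")
        else xs
      aGo n xs'
    else xs

def update_disc (new_map : List String) : List String :=
  aGo new_map.length new_map

-- ===== PORT B =====
-- two-pointer loop of Source B; l, r are Python ints (l stays ≥ 0, r ≥ l when indexing)
def bGo (xs : List String) (l r : Int) : List String :=
  if l < r then
    if xs.getD l.toNat "" ≠ "." then bGo xs (l+1) r
    else if xs.getD r.toNat "" = "." then bGo xs l (r-1)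
    else bGo ((xs.set l.toNat (xs.getD r.toNat "")).set r.toNat (xs.getD l.toNat "")) (l+1) (r-1)
  else xs
termination_by (r - l).toNat
decreasing_by all_goals omega

def update_disc_alt (new_map : List String) : List String :=
  bGo new_map 0 ((new_map.length : Int) - 1)

-- ===== PRECONDITION & SPEC =====
def Spec_update_disc (new_map : List String) (out : List String) : Prop := out = update_disc_alt new_map
instance (new_map : List String) (out : List String) : Decidable (Spec_update_disc new_map out) := by unfold Spec_update_disc; infer_instance

-- ===== CLAIM (what is proved, stated in full; the proofs are below) =====
def Claim_equal_update_disc : Prop := ∀ (new_map : List String), Dom_update_disc new_map → Spec_update_disc new_map (update_disc new_map)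

-- ===== LEMMAS AND PROOFS =====

-- one-step unfolding of bGo (well-founded definition)
theorem bGo_eq (xs : List String) (l r : Int) : bGo xs l r =
    if l < r then
      if xs.getD l.toNat "" ≠ "." then bGo xs (l+1) r
      else if xs.getD r.toNat "" = "." then bGo xs l (r-1)
      else bGo ((xs.set l.toNat (xs.getD r.toNat "")).set r.toNat (xs.getD l.toNat "")) (l+1) (r-1)
    else xs := by
  rw [bGo]

theorem getD_ne_dot (xs : List String) (h : "." ∉ xs) (n : Nat) : xs.getD n "" ≠ "." := by
  intro he
  by_cases hn : n < xs.length
  · rw [List.getD_eq_getElem xs "" hn] at he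
    exact h (he ▸ List.getElem_mem hn)
  · rw [List.getD_eq_default xs "" (by omega)] at he
    simp at he

theorem getD_before_idxOf (ys : List String) (i : Nat) (hi : i < ys.idxOf ".")
    (hl : i < ys.length) : ys.getD i "" ≠ "." := by
  rw [List.getD_eq_getElem _ _ hl]
  have h2 := List.not_of_lt_findIdx (p := (· == ".")) (xs := ys) (by simpa [List.idxOf] using hi)
  simpa using h2

-- A's loop only touches indices < n
theorem aGo_append (n : Nat) (ys zs : List String) (h : n ≤ ys.length) :
    aGo n (ys ++ zs) = aGo n ys ++ zs := by
  induction n generalizing ys with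
  | zero => simp [aGo]
  | succ m ih =>
    have htake : (ys ++ zs).take (m+1) = ys.take (m+1) :=
      List.take_append_of_le_length h
    have hget : (ys ++ zs).getD m "" = ys.getD m "" :=
      List.getD_append ys zs "" m (by omega)
    simp only [aGo, htake, hget]
    split
    · next hmem =>
      split
      · next hne =>
        have hdlt : (ys.take (m+1)).idxOf "." < ys.length := by
          have := List.idxOf_lt_length_of_mem hmem
          have := List.length_take_le (m+1) ys
          omega
        have hgd : (ys ++ zs).getD ((ys.take (m+1)).idxOf ".") "" =
            ys.getD ((ys.take (m+1)).idxOf ".") "" :=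
          List.getD_append ys zs "" _ hdlt
        rw [hgd, List.set_append_left _ _ hdlt,
            List.set_append_left _ _ (show m < (ys.set (List.idxOf "." (List.take (m+1) ys)) (ys.getD m "")).length by simp; omega)]
        exact ih _ (by simp; omega)
      · exact ih ys (by omega)
    · rfl

-- B never changes a dot-free list
theorem bGo_nodot (xs : List String) (l r : Int) (h : "." ∉ xs) : bGo xs l r = xs := by
  revert h
  fun_induction bGo xs l r with
  | case1 xs l r hlr h1 ih => intro h; exact ih h
  | case2 xs l r hlr h1 h2 ih => intro h; exact absurd (not_not.mp h1) (getD_ne_dot xs h l.toNat)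
  | case3 xs l r hlr h1 h2 ih => intro h; exact absurd (not_not.mp h1) (getD_ne_dot xs h l.toNat)
  | case4 xs l r hlr => intro h; rfl

theorem bGo_append_aux (k : Nat) : ∀ (ys zs : List String) (l r : Int),
    (r - l).toNat ≤ k → 0 ≤ l → r < ys.length →
    bGo (ys ++ zs) l r = bGo ys l r ++ zs := by
  induction k with
  | zero =>
    intro ys zs l r hk hl hr
    rw [bGo_eq (ys ++ zs) l r, bGo_eq ys l r]
    rw [if_neg (by omega), if_neg (by omega)]
  | succ m ih =>
    intro ys zs l r hk hl hr
    rw [bGo_eq (ys ++ zs) l r, bGo_eq ys l r]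
    by_cases hlr : l < r
    · rw [if_pos hlr, if_pos hlr]
      have hln : l.toNat < ys.length := by omega
      have hrn : r.toNat < ys.length := by omega
      rw [List.getD_append ys zs "" l.toNat hln, List.getD_append ys zs "" r.toNat hrn]
      by_cases h1 : ys.getD l.toNat "" ≠ "."
      · rw [if_pos h1, if_pos h1]
        exact ih ys zs (l+1) r (by omega) (by omega) hr
      · rw [if_neg h1, if_neg h1]
        by_cases h2 : ys.getD r.toNat "" = "."
        · rw [if_pos h2, if_pos h2]
          exact ih ys zs l (r-1) (by omega) hl (by omega)
        · rw [if_neg h2, if_neg h2,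
              List.set_append_left _ _ hln,
              List.set_append_left _ _ (show r.toNat < (ys.set l.toNat (ys.getD r.toNat "")).length by simp; omega)]
          exact ih _ zs (l+1) (r-1) (by omega) (by omega) (by simp; omega)
    · rw [if_neg hlr, if_neg hlr]

-- B with r strictly inside ys never touches the appended tail
theorem bGo_append (ys zs : List String) (l r : Int) (hl : 0 ≤ l) (hr : r < ys.length) :
    bGo (ys ++ zs) l r = bGo ys l r ++ zs :=
  bGo_append_aux (r - l).toNat ys zs l r le_rfl hl hr

-- skipping a dot-free prefix
theorem bGo_skip (k : Nat) (xs : List String) (r : Int)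
    (h : ∀ i : Nat, i < k → xs.getD i "" ≠ ".") :
    bGo xs 0 r = bGo xs (k : Int) r := by
  induction k with
  | zero => rfl
  | succ m ih =>
    rw [ih (fun i hi => h i (by omega))]
    by_cases hmr : (m : Int) < r
    · rw [bGo_eq xs m r, if_pos hmr,
          if_pos (show xs.getD (m : Int).toNat "" ≠ "." by simpa using h m (by omega))]
      norm_num
    · rw [bGo_eq xs m r, if_neg hmr, bGo_eq xs ((m+1 : Nat) : Int) r,
          if_neg (by push_cast; omega)]

theorem bGo_snoc_dot_aux (k : Nat) : ∀ (ys : List String) (l : Int), 0 ≤ l →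
    ((ys.length : Int) - l).toNat ≤ k →
    bGo (ys ++ ["."]) l (ys.length : Int) = bGo ys l ((ys.length : Int) - 1) ++ ["."] := by
  induction k with
  | zero =>
    intro ys l hl hk
    rw [bGo_eq (ys ++ ["."]) l _, if_neg (by omega),
        bGo_eq ys l _, if_neg (by omega)]
  | succ m ih =>
    intro ys l hl hk
    by_cases hlr : l < (ys.length : Int)
    · have hln : l.toNat < ys.length := by omega
      rw [bGo_eq (ys ++ ["."]) l _, if_pos hlr,
          List.getD_append ys ["."] "" l.toNat hln]
      by_cases h1 : ys.getD l.toNat "" ≠ "."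
      · rw [if_pos h1, ih ys (l+1) (by omega) (by omega)]
        by_cases h2 : l < (ys.length : Int) - 1
        · rw [bGo_eq ys l ((ys.length : Int) - 1), if_pos h2, if_pos h1]
        · rw [bGo_eq ys l ((ys.length : Int) - 1), if_neg h2,
              bGo_eq ys (l+1) ((ys.length : Int) - 1), if_neg (by omega)]
      · rw [if_neg h1]
        have hget : (ys ++ ["."]).getD (ys.length : Int).toNat "" = "." := by
          rw [Int.toNat_natCast]
          simp
        rw [if_pos hget, bGo_append ys ["."] l ((ys.length : Int) - 1) hl (by omega)]
    · rw [bGo_eq (ys ++ ["."]) l _, if_neg hlr,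
          bGo_eq ys l _, if_neg (by omega)]

-- B's snoc recurrence when the last element is "."
theorem bGo_snoc_dot (ys : List String) (l : Int) (hl : 0 ≤ l) :
    bGo (ys ++ ["."]) l (ys.length : Int) = bGo ys l ((ys.length : Int) - 1) ++ ["."] :=
  bGo_snoc_dot_aux ((ys.length : Int) - l).toNat ys l hl le_rfl

theorem main_eq (n : Nat) : ∀ xs : List String, xs.length = n →
    update_disc xs = update_disc_alt xs := by
  induction n with
  | zero =>
    intro xs hx
    have hnil : xs = [] := List.eq_nil_of_length_eq_zero hx
    subst hnil
    unfold update_disc update_disc_alt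
    rw [bGo_eq]
    norm_num [aGo]
  | succ m ih =>
    intro xs hx
    rcases List.eq_nil_or_concat xs with hnil | ⟨ys, v, hconc⟩
    · subst hnil; simp at hx
    · have hxs : xs = ys ++ [v] := by simpa [List.concat_eq_append] using hconc
      subst hxs
      have hys : ys.length = m := by simpa using hx
      have hlen : (ys ++ [v]).length = ys.length + 1 := by simp
      have htake : (ys ++ [v]).take (ys.length + 1) = ys ++ [v] :=
        List.take_of_length_le (by simp)
      have hgetv : (ys ++ [v]).getD ys.length "" = v := by simp
      by_cases hmem : "." ∈ ys ++ [v]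
      · by_cases hv : v = "."
        · subst hv
          have hA : update_disc (ys ++ ["."]) = update_disc ys ++ ["."] := by
            unfold update_disc
            rw [hlen]
            simp only [aGo]
            rw [htake, if_pos hmem, if_neg (by rw [hgetv]; simp),
                aGo_append ys.length ys ["."] le_rfl]
          have hB : update_disc_alt (ys ++ ["."]) = update_disc_alt ys ++ ["."] := by
            unfold update_disc_alt
            rw [show (((ys ++ ["."]).length : Int)) - 1 = (ys.length : Int) by simp,
                bGo_snoc_dot ys 0 le_rfl]
          rw [hA, hB, ih ys hys]
        · have hdot : "." ∈ ys := by
            rcases List.mem_append.mp hmem with h | h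
            · exact h
            · simp only [List.mem_singleton] at h
              exact absurd h.symm hv
          have hdlt : ys.idxOf "." < ys.length := List.idxOf_lt_length_of_mem hdot
          have hgd : ys.getD (ys.idxOf ".") "" = "." := by
            rw [List.getD_eq_getElem _ _ hdlt]; exact List.getElem_idxOf hdlt
          have hidx : (ys ++ [v]).idxOf "." = ys.idxOf "." := List.idxOf_append_of_mem hdot
          have hgd' : (ys ++ [v]).getD (ys.idxOf ".") "" = "." := by
            rw [List.getD_append ys [v] "" _ hdlt]; exact hgd
          have hswap : ((ys ++ [v]).set (ys.idxOf ".") v).set ys.length "." =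
              ys.set (ys.idxOf ".") v ++ ["."] := by
            rw [List.set_append_left _ _ hdlt,
                List.set_append_right _ _ (le_of_eq (by simp))]
            simp
          have hA : update_disc (ys ++ [v]) = update_disc (ys.set (ys.idxOf ".") v) ++ ["."] := by
            unfold update_disc
            rw [hlen]
            simp only [aGo]
            rw [htake, if_pos hmem, if_pos (by rw [hgetv]; exact hv),
                hidx, hgetv, hgd', hswap,
                aGo_append ys.length (ys.set (ys.idxOf ".") v) ["."] (by simp),
                List.length_set]
          have hprefix : ∀ i : Nat, i < ys.idxOf "." → (ys ++ [v]).getD i "" ≠ "." := by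
            intro i hi
            rw [List.getD_append ys [v] "" i (by omega)]
            exact getD_before_idxOf ys i hi (by omega)
          have hpre2 : ∀ i : Nat, i < ys.idxOf "." + 1 →
              (ys.set (ys.idxOf ".") v).getD i "" ≠ "." := by
            intro i hi
            rw [List.getD_eq_getElem _ _ (by simp; omega), List.getElem_set]
            split
            · next hid => exact hv
            · next hid => exact getD_before_idxOf ys i (by omega) (by omega) ∘
                (by rw [List.getD_eq_getElem _ _ (show i < ys.length by omega)]; exact id)
          have hB : update_disc_alt (ys ++ [v]) =
              update_disc_alt (ys.set (ys.idxOf ".") v) ++ ["."] := by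
            unfold update_disc_alt
            rw [show (((ys ++ [v]).length : Int)) - 1 = (ys.length : Int) by simp,
                bGo_skip (ys.idxOf ".") (ys ++ [v]) _ hprefix,
                bGo_eq, if_pos (by exact_mod_cast hdlt)]
            rw [Int.toNat_natCast, hgd', if_neg (by simp)]
            rw [Int.toNat_natCast, hgetv, if_neg hv, hswap]
            rw [bGo_append (ys.set (ys.idxOf ".") v) ["."] ((ys.idxOf "." : Int) + 1)
                  ((ys.length : Int) - 1) (by omega) (by simp)]
            rw [show ((ys.idxOf "." : Int) + 1) = ((ys.idxOf "." + 1 : Nat) : Int) by push_cast; ring]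
            rw [← bGo_skip (ys.idxOf "." + 1) (ys.set (ys.idxOf ".") v) _ hpre2]
            rw [show (((ys.set (ys.idxOf ".") v).length : Int)) - 1 = (ys.length : Int) - 1 by simp]
          rw [hA, hB, ih (ys.set (ys.idxOf ".") v) (by simpa using hys)]
      · have hA : update_disc (ys ++ [v]) = ys ++ [v] := by
          unfold update_disc
          rw [hlen]
          simp only [aGo]
          rw [htake, if_neg hmem]
        rw [hA]
        unfold update_disc_alt
        rw [bGo_nodot _ _ _ hmem]

-- ===== VERDICT (by name: the statement is the Claim_ definition above) =====
theorem update_disc_spec : Claim_equal_update_disc := by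
  intro xs _
  unfold Spec_update_disc
  exact main_eq xs.length xs rfl
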